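-- pv_equiv track=rewrite | github.com/oliverhaas/django-cachex | django_cachex/client/rust.py | _select_info_section
-- ===== SOURCE A (Python) =====
-- def _select_info_section(raw: str, section: str) -> str:
--     """Return only the ``# <section>`` block from a full INFO response."""
--     target = section.strip().lower()
--     out: list[str] = []
--     in_section = False
--     for line in raw.splitlines():
--         if line.startswith("#"):
--             in_section = line[1:].strip().lower() == target
--             continue
--         if in_section:
--             out.append(line)
--     return "\n".join(out)
-- ===== SOURCE B (Python) =====
-- def _split_at_header(lines):
--     """Split into (lines before the next '#' header, remainder starting at that header)."""
--     for i, line in enumerate(lines):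
--         if line.startswith("#"):
--             return lines[:i], lines[i:]
--     return lines, []
--
--
-- def _select_info_section(raw: str, section: str) -> str:
--     """Segment the text into header-delimited blocks and keep the matching ones."""
--     target = section.strip().lower()
--     _, rest = _split_at_header(raw.splitlines())  # discard the pre-header region
--     out: list[str] = []
--     while rest:
--         header, rest = rest[0], rest[1:]
--         body, rest = _split_at_header(rest)
--         if header[1:].strip().lower() == target:
--             out.extend(body)
--     return "\n".join(out)
-- ===== Notes on version B (the rewrite author's own statement) =====
-- stated objective: alternative
-- what changed: B replaces A's flag-driven single fold with a segmentation approach: a helper splits the line list at the next '#' header, the pre-header region is discarded, and the outer loop consumes one (header, body) block at a time, keeping bodies whose header matches.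
import Mathlib
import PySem

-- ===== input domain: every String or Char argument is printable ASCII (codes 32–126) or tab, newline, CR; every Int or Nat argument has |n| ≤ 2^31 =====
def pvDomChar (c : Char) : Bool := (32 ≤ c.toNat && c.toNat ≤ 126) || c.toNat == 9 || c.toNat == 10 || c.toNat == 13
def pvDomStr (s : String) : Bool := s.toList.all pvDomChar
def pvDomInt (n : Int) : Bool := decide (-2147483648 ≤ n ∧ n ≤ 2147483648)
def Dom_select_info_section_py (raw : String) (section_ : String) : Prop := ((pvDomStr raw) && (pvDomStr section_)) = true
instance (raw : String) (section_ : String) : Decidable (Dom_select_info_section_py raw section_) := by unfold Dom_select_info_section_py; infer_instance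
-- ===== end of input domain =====

-- B replaces A's flag-driven fold with header-delimited segmentation (split at the
-- next header, drop the pre-header region, keep matching blocks); alternative, same cost.

-- ===== PORT A =====
-- header name of a '#' line: line[1:].strip().lower()
def headerName (line : String) : String :=
  PySem.Str.lower (PySem.Str.strip (PySem.Str.slice line (some 1) none))

-- A's loop body: state = (out, in_section)
def stepA (target : String) (st : List String × Bool) (line : String) : List String × Bool :=
  if PySem.Str.startswith line "#" then (st.1, headerName line == target)
  else if st.2 then (st.1 ++ [line], st.2) else st

def select_info_section_py (raw : String) (section_ : String) : String :=
  let target := PySem.Str.lower (PySem.Str.strip section_)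
  let st := (PySem.Str.splitlines raw).foldl (stepA target) ([], false)
  PySem.Str.join "\n" st.1

-- ===== PORT B =====
-- _split_at_header: (lines before the next '#' header, remainder from that header)
def splitAtHeader : List String → List String × List String
  | [] => ([], [])
  | l :: ls =>
      if PySem.Str.startswith l "#" then ([], l :: ls)
      else
        let p := splitAtHeader ls
        (l :: p.1, p.2)

theorem splitAtHeader_snd_length_le (ls : List String) :
    (splitAtHeader ls).2.length ≤ ls.length := by
  induction ls with
  | nil => simp [splitAtHeader]
  | cons l ls ih =>
      simp only [splitAtHeader]
      split
      · simp
      · exact Nat.le_succ_of_le ih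

-- B's outer while loop: rest starts at a header (or is empty); one block per step
def collectBlocks (target : String) : List String → List String
  | [] => []
  | header :: rest =>
      let p := splitAtHeader rest
      (if headerName header == target then p.1 else []) ++ collectBlocks target p.2
termination_by l => l.length
decreasing_by
  exact Nat.lt_succ_of_le (splitAtHeader_snd_length_le rest)

def select_info_section_py_alt (raw : String) (section_ : String) : String :=
  let target := PySem.Str.lower (PySem.Str.strip section_)
  let rest := (splitAtHeader (PySem.Str.splitlines raw)).2
  PySem.Str.join "\n" (collectBlocks target rest)

-- ===== PRECONDITION & SPEC =====
def Spec_select_info_section_py (raw : String) (section_ : String) (out : String) : Prop := out = select_info_section_py_alt raw section_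
instance (raw : String) (section_ : String) (out : String) : Decidable (Spec_select_info_section_py raw section_ out) := by unfold Spec_select_info_section_py; infer_instance

-- ===== CLAIM =====
def Claim_equal_select_info_section_py : Prop := ∀ (raw : String) (section_ : String), Dom_select_info_section_py raw section_ → Spec_select_info_section_py raw section_ (select_info_section_py raw section_)

-- ===== LEMMAS AND PROOFS =====

theorem collectBlocks_nil (t : String) : collectBlocks t [] = [] := by
  rw [collectBlocks.eq_def]

theorem collectBlocks_cons (t h : String) (rest : List String) :
    collectBlocks t (h :: rest)
      = (if headerName h == t then (splitAtHeader rest).1 else [])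
          ++ collectBlocks t (splitAtHeader rest).2 := by
  rw [collectBlocks.eq_def]

theorem splitAtHeader_cons (l : String) (ls : List String) :
    splitAtHeader (l :: ls) = if PySem.Str.startswith l "#" then ([], l :: ls)
      else (l :: (splitAtHeader ls).1, (splitAtHeader ls).2) := rfl

theorem splitAtHeader_cons_pos (l : String) (ls : List String)
    (hh : PySem.Str.startswith l "#" = true) :
    splitAtHeader (l :: ls) = ([], l :: ls) := by
  rw [splitAtHeader_cons, if_pos hh]

theorem splitAtHeader_cons_neg (l : String) (ls : List String)
    (hh : ¬ PySem.Str.startswith l "#" = true) :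
    splitAtHeader (l :: ls) = (l :: (splitAtHeader ls).1, (splitAtHeader ls).2) := by
  rw [splitAtHeader_cons, if_neg hh]

-- A's fold from any state equals: (if the flag is set, the body up to the next header)
-- followed by B's block collection from that header on.
theorem foldA_eq_blocks (target : String) (lines : List String)
    (out : List String) (f : Bool) :
    (lines.foldl (stepA target) (out, f)).1
      = out ++ (if f then (splitAtHeader lines).1 else [])
            ++ collectBlocks target (splitAtHeader lines).2 := by
  induction lines generalizing out f with
  | nil => simp [splitAtHeader, collectBlocks_nil]
  | cons l ls ih =>
      simp only [List.foldl_cons]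
      by_cases hh : PySem.Str.startswith l "#" = true
      · have eA : stepA target (out, f) l = (out, headerName l == target) := by
          unfold stepA; rw [if_pos hh]
        rw [eA, ih, splitAtHeader_cons_pos l ls hh, collectBlocks_cons]
        simp
      · cases f with
        | false =>
            have eA : stepA target (out, false) l = (out, false) := by
              unfold stepA; rw [if_neg hh]; rfl
            rw [eA, ih, splitAtHeader_cons_neg l ls hh]; simp
        | true =>
            have eA : stepA target (out, true) l = (out ++ [l], true) := by
              unfold stepA; rw [if_neg hh]; rfl
            rw [eA, ih, splitAtHeader_cons_neg l ls hh]; simp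

-- ===== VERDICT =====
theorem select_info_section_py_spec : Claim_equal_select_info_section_py := by
  intro raw section_ _
  unfold Spec_select_info_section_py
  simp only [select_info_section_py, select_info_section_py_alt]
  rw [foldA_eq_blocks]
  simp
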